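-- pv_equiv track=rewrite | github.com/tadelv/reaprime | tools/ingest_profiles.py | _tokenize_tcl
-- ===== SOURCE A (Python) =====
-- def _tokenize_tcl(s):
--     """Tokenize a TCL key-value string, handling {braced} values."""
--     tokens = []
--     i = 0
--     while i < len(s):
--         # Skip whitespace
--         while i < len(s) and s[i] in " \t":
--             i += 1
--         if i >= len(s):
--             break
--
--         if s[i] == "{":
--             # Braced value — find matching close brace
--             depth = 1
--             i += 1
--             start = i
--             while i < len(s) and depth > 0:
--                 if s[i] == "{":
--                     depth += 1
--                 elif s[i] == "}":
--                     depth -= 1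
--                 i += 1
--             tokens.append(s[start : i - 1])
--         elif s[i] == '"':
--             # Quoted value
--             i += 1
--             start = i
--             while i < len(s) and s[i] != '"':
--                 i += 1
--             tokens.append(s[start:i])
--             i += 1
--         else:
--             # Bare word
--             start = i
--             while i < len(s) and s[i] not in " \t":
--                 i += 1
--             tokens.append(s[start:i])
--
--     return tokens
-- ===== SOURCE B (Python) =====
-- def _tokenize_tcl(s):
--     """Tokenize a TCL key-value string, handling {braced} values.
--
--     Single-pass finite state machine over the characters of s: a mode
--     variable (whitespace / braced / quoted / bare word), the index where
--     the current token started, and a brace-depth counter.  A token is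
--     emitted when its closing delimiter is seen; a token still open at the
--     end of input is flushed as the remainder of the string.
--     """
--     tokens = []
--     mode = "ws"
--     start = 0
--     depth = 0
--     for i, c in enumerate(s):
--         if mode == "ws":
--             if c in " \t":
--                 continue
--             if c == "{":
--                 mode, start, depth = "brace", i + 1, 1
--             elif c == '"':
--                 mode, start = "quote", i + 1
--             else:
--                 mode, start = "word", i
--         elif mode == "brace":
--             if c == "{":
--                 depth += 1
--             elif c == "}":
--                 depth -= 1
--                 if depth == 0:
--                     tokens.append(s[start:i])
--                     mode = "ws"
--         elif mode == "quote":
--             if c == '"':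
--                 tokens.append(s[start:i])
--                 mode = "ws"
--         else:  # bare word
--             if c in " \t":
--                 tokens.append(s[start:i])
--                 mode = "ws"
--     if mode != "ws":
--         tokens.append(s[start:])
--     return tokens
-- ===== Notes on version B (the rewrite author's own statement) =====
-- stated objective: alternative
-- what changed: Replaced A's outer while-loop with per-mode inner while-loops by a single-pass finite-state machine over the string's indices (mode, token-start, brace-depth as state), with one uniform end-of-input flush of the remainder for an open token.
-- intended difference: On inputs ending inside an unterminated braced token with at least one character after its '{', A's s[start:i-1] slice drops the token's final character (e.g. '{a' -> ['']) while B keeps the whole remainder (['a']), which is the intended value for an unterminated brace. — e.g. on _tokenize_tcl("{a"): A returns [""], B returns ["a"]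
import Mathlib
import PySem

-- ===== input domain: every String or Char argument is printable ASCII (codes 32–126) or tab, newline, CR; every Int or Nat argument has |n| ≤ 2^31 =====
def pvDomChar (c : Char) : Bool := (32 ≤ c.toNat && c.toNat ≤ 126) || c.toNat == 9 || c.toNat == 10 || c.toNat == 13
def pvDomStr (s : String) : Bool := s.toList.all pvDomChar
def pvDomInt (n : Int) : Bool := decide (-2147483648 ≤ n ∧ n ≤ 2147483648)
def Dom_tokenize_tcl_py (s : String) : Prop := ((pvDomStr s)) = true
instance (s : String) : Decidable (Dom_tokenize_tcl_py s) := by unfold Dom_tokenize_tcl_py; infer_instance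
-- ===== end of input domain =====

-- B replaces A's outer loop with per-mode inner while-loops by a single-pass
-- finite-state machine (objective: alternative decomposition); on strings ending in an
-- unterminated braced token B keeps the whole remainder where A drops its last character (see D_).

-- Python slice s[a:b] for 0 ≤ a, 0 ≤ b (exact for nonnegative bounds: clamp, empty if a ≥ b)
def pvSlice (cs : List Char) (a b : Nat) : String := String.ofList ((cs.take b).drop a)

-- ===== PORT A =====
-- Each while-loop is a structural recursion on a fuel counter; the fuel is only a totality
-- guard (every call site passes enough fuel for the loop to reach its exit condition, so the
-- computed value is exactly the Python loop's).

-- inner while-loop: skip whitespace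
def pvSkipWsA (cs : List Char) : Nat → Nat → Nat
  | 0, i => i
  | f + 1, i =>
      if i < cs.length ∧ (cs.getD i ' ' = ' ' ∨ cs.getD i ' ' = '\t') then
        pvSkipWsA cs f (i + 1)
      else i

-- inner while-loop: braced value, track depth
def pvBraceScanA (cs : List Char) : Nat → Nat → Nat → Nat
  | 0, i, _ => i
  | f + 1, i, depth =>
      if i < cs.length ∧ 0 < depth then
        if cs.getD i ' ' = '{' then pvBraceScanA cs f (i + 1) (depth + 1)
        else if cs.getD i ' ' = '}' then pvBraceScanA cs f (i + 1) (depth - 1)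
        else pvBraceScanA cs f (i + 1) depth
      else i

-- inner while-loop: quoted value
def pvQuoteScanA (cs : List Char) : Nat → Nat → Nat
  | 0, i => i
  | f + 1, i => if i < cs.length ∧ cs.getD i ' ' ≠ '"' then pvQuoteScanA cs f (i + 1) else i

-- inner while-loop: bare word
def pvWordScanA (cs : List Char) : Nat → Nat → Nat
  | 0, i => i
  | f + 1, i =>
      if i < cs.length ∧ ¬(cs.getD i ' ' = ' ' ∨ cs.getD i ' ' = '\t') then
        pvWordScanA cs f (i + 1)
      else i

-- A's outer while-loop
def pvMainA (cs : List Char) : Nat → Nat → List String → List String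
  | 0, _, tokens => tokens
  | f + 1, i, tokens =>
      if i < cs.length then
        if pvSkipWsA cs (cs.length + 1) i < cs.length then
          if cs.getD (pvSkipWsA cs (cs.length + 1) i) ' ' = '{' then
            pvMainA cs f (pvBraceScanA cs (cs.length + 1) (pvSkipWsA cs (cs.length + 1) i + 1) 1)
              (tokens ++ [pvSlice cs (pvSkipWsA cs (cs.length + 1) i + 1)
                (pvBraceScanA cs (cs.length + 1) (pvSkipWsA cs (cs.length + 1) i + 1) 1 - 1)])
          else if cs.getD (pvSkipWsA cs (cs.length + 1) i) ' ' = '"' then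
            pvMainA cs f (pvQuoteScanA cs (cs.length + 1) (pvSkipWsA cs (cs.length + 1) i + 1) + 1)
              (tokens ++ [pvSlice cs (pvSkipWsA cs (cs.length + 1) i + 1)
                (pvQuoteScanA cs (cs.length + 1) (pvSkipWsA cs (cs.length + 1) i + 1))])
          else
            pvMainA cs f (pvWordScanA cs (cs.length + 1) (pvSkipWsA cs (cs.length + 1) i))
              (tokens ++ [pvSlice cs (pvSkipWsA cs (cs.length + 1) i)
                (pvWordScanA cs (cs.length + 1) (pvSkipWsA cs (cs.length + 1) i))])
        else tokens
      else tokens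

def tokenize_tcl_py (s : String) : List String :=
  pvMainA s.toList (s.toList.length + 1) 0 []

-- ===== PORT B =====
inductive PvModeB
  | ws | brace | quote | word
deriving DecidableEq, Repr

-- one step of B's state machine; state = (mode, start, depth, tokens)
def pvStepB (cs : List Char) (st : PvModeB × Nat × Nat × List String) (i : Nat) :
    PvModeB × Nat × Nat × List String :=
  match st with
  | (m, start, depth, tokens) =>
    let c := cs.getD i ' '
    match m with
    | .ws =>
        if c = ' ' ∨ c = '\t' then (m, start, depth, tokens)
        else if c = '{' then (.brace, i + 1, 1, tokens)
        else if c = '"' then (.quote, i + 1, depth, tokens)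
        else (.word, i, depth, tokens)
    | .brace =>
        if c = '{' then (.brace, start, depth + 1, tokens)
        else if c = '}' then
          if depth - 1 = 0 then (.ws, start, depth - 1, tokens ++ [pvSlice cs start i])
          else (.brace, start, depth - 1, tokens)
        else (m, start, depth, tokens)
    | .quote =>
        if c = '"' then (.ws, start, depth, tokens ++ [pvSlice cs start i])
        else (m, start, depth, tokens)
    | .word =>
        if c = ' ' ∨ c = '\t' then (.ws, start, depth, tokens ++ [pvSlice cs start i])
        else (m, start, depth, tokens)

-- final flush: a token still open at end of input is the remainder of the string
def pvFlushB (cs : List Char) (st : PvModeB × Nat × Nat × List String) : List String :=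
  match st with
  | (m, start, _, tokens) =>
    if m = .ws then tokens else tokens ++ [pvSlice cs start cs.length]

def tokenize_tcl_py_alt (s : String) : List String :=
  pvFlushB s.toList ((List.range s.toList.length).foldl (pvStepB s.toList) (.ws, 0, 0, []))

-- ===== PRECONDITION & SPEC =====
-- D_ helper: a standalone mode scan of the input deciding whether it ends inside an
-- unterminated braced token with at least one character after its '{'
inductive PvDMode
  | ws | brace (d : Nat) | tok (q : Bool)

def pvDScan : List Char → PvDMode → Bool
  | [], .brace _ => true
  | [], _ => false
  | c :: r, .ws =>
      if c = ' ' ∨ c = '\t' then pvDScan r .ws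
      else if c = '{' then (!r.isEmpty && pvDScan r (.brace 1))
      else pvDScan r (.tok (decide (c = '"')))
  | c :: r, .brace d =>
      if c = '{' then pvDScan r (.brace (d + 1))
      else pvDScan r (if c = '}' then (if d = 1 then .ws else .brace (d - 1)) else .brace d)
  | c :: r, .tok q =>
      pvDScan r (if (if q then c = '"' else c = ' ' ∨ c = '\t') then .ws else .tok q)

-- On inputs ending inside an unterminated braced token with nonempty content, A drops the
-- token's final character (s[start:i-1] with the scan stopped at end of input) while B keeps
-- the whole remainder s[start:], which is the intended value for an unterminated brace.
def D_tokenize_tcl_py (s : String) : Prop := pvDScan s.toList .ws = true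
instance (s : String) : Decidable (D_tokenize_tcl_py s) := by unfold D_tokenize_tcl_py; infer_instance

def Spec_tokenize_tcl_py (s : String) (out : List String) : Prop :=
  ¬ D_tokenize_tcl_py s → out = tokenize_tcl_py_alt s
instance (s : String) (out : List String) : Decidable (Spec_tokenize_tcl_py s out) := by unfold Spec_tokenize_tcl_py; infer_instance

def pvDiffWitness_tokenize_tcl_py : String := "{a"
def pvDiffWitnessOut_tokenize_tcl_py : (List String) × (List String) := ([""], ["a"])

-- ===== CLAIM (what is proved, stated in full; the proofs are below) =====
def Claim_unchanged_tokenize_tcl_py : Prop := ∀ (s : String), Dom_tokenize_tcl_py s → Spec_tokenize_tcl_py s (tokenize_tcl_py s)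
def Claim_changed_tokenize_tcl_py : Prop := Dom_tokenize_tcl_py (pvDiffWitness_tokenize_tcl_py) ∧ D_tokenize_tcl_py (pvDiffWitness_tokenize_tcl_py) ∧ tokenize_tcl_py (pvDiffWitness_tokenize_tcl_py) = pvDiffWitnessOut_tokenize_tcl_py.1 ∧ tokenize_tcl_py_alt (pvDiffWitness_tokenize_tcl_py) = pvDiffWitnessOut_tokenize_tcl_py.2 ∧ pvDiffWitnessOut_tokenize_tcl_py.1 ≠ pvDiffWitnessOut_tokenize_tcl_py.2
def Claim_exact_tokenize_tcl_py : Prop := ∀ (s : String), Dom_tokenize_tcl_py s → D_tokenize_tcl_py s → tokenize_tcl_py s ≠ tokenize_tcl_py_alt s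

-- ===== LEMMAS AND PROOFS =====

-- proof-side views of the D-scanner in each mode
def pvDWs (xs : List Char) : Bool := pvDScan xs .ws
def pvDBrace (xs : List Char) (d : Nat) : Bool := pvDScan xs (.brace d)
def pvDQuote (xs : List Char) : Bool := pvDScan xs (.tok true)
def pvDWord (xs : List Char) : Bool := pvDScan xs (.tok false)


-- one-step unfolding equations of the fuelled loops (all definitional)
theorem pvSkipWsA_succ (cs : List Char) (f i : Nat) :
    pvSkipWsA cs (f + 1) i =
      if i < cs.length ∧ (cs.getD i ' ' = ' ' ∨ cs.getD i ' ' = '\t') then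
        pvSkipWsA cs f (i + 1)
      else i := rfl
theorem pvBraceScanA_succ (cs : List Char) (f i d : Nat) :
    pvBraceScanA cs (f + 1) i d =
      if i < cs.length ∧ 0 < d then
        if cs.getD i ' ' = '{' then pvBraceScanA cs f (i + 1) (d + 1)
        else if cs.getD i ' ' = '}' then pvBraceScanA cs f (i + 1) (d - 1)
        else pvBraceScanA cs f (i + 1) d
      else i := rfl
theorem pvQuoteScanA_succ (cs : List Char) (f i : Nat) :
    pvQuoteScanA cs (f + 1) i =
      if i < cs.length ∧ cs.getD i ' ' ≠ '"' then pvQuoteScanA cs f (i + 1) else i := rfl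
theorem pvWordScanA_succ (cs : List Char) (f i : Nat) :
    pvWordScanA cs (f + 1) i =
      if i < cs.length ∧ ¬(cs.getD i ' ' = ' ' ∨ cs.getD i ' ' = '\t') then
        pvWordScanA cs f (i + 1)
      else i := rfl
theorem pvMainA_succ (cs : List Char) (f i : Nat) (tokens : List String) :
    pvMainA cs (f + 1) i tokens =
      if i < cs.length then
        if pvSkipWsA cs (cs.length + 1) i < cs.length then
          if cs.getD (pvSkipWsA cs (cs.length + 1) i) ' ' = '{' then
            pvMainA cs f (pvBraceScanA cs (cs.length + 1) (pvSkipWsA cs (cs.length + 1) i + 1) 1)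
              (tokens ++ [pvSlice cs (pvSkipWsA cs (cs.length + 1) i + 1)
                (pvBraceScanA cs (cs.length + 1) (pvSkipWsA cs (cs.length + 1) i + 1) 1 - 1)])
          else if cs.getD (pvSkipWsA cs (cs.length + 1) i) ' ' = '"' then
            pvMainA cs f (pvQuoteScanA cs (cs.length + 1) (pvSkipWsA cs (cs.length + 1) i + 1) + 1)
              (tokens ++ [pvSlice cs (pvSkipWsA cs (cs.length + 1) i + 1)
                (pvQuoteScanA cs (cs.length + 1) (pvSkipWsA cs (cs.length + 1) i + 1))])
          else
            pvMainA cs f (pvWordScanA cs (cs.length + 1) (pvSkipWsA cs (cs.length + 1) i))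
              (tokens ++ [pvSlice cs (pvSkipWsA cs (cs.length + 1) i)
                (pvWordScanA cs (cs.length + 1) (pvSkipWsA cs (cs.length + 1) i))])
        else tokens
      else tokens := rfl

theorem pvMainA_end (cs : List Char) (F i : Nat) (toks : List String) (h : cs.length ≤ i) :
    pvMainA cs F i toks = toks := by
  cases F with
  | zero => rfl
  | succ g => rw [pvMainA_succ, if_neg (by omega)]

-- unfolding equations of the D-scanner wrappers (all definitional)
theorem pvDWs_nil : pvDWs [] = false := rfl
theorem pvDWs_cons (c : Char) (r : List Char) :
    pvDWs (c :: r) =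
      if c = ' ' ∨ c = '\t' then pvDWs r
      else if c = '{' then (if r = [] then false else pvDBrace r 1)
      else if c = '"' then pvDQuote r
      else pvDWord r := by
  by_cases h1 : c = ' ' ∨ c = '\t'
  · simp [pvDWs, pvDScan, h1]
  · by_cases h2 : c = '{'
    · cases r <;> simp [pvDWs, pvDScan, pvDBrace, h1, h2]
    · by_cases h3 : c = '"' <;> simp [pvDWs, pvDScan, pvDQuote, pvDWord, h1, h2, h3]
theorem pvDBrace_cons (c : Char) (r : List Char) (d : Nat) :
    pvDBrace (c :: r) d =
      if c = '{' then pvDBrace r (d + 1)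
      else if c = '}' then (if d = 1 then pvDWs r else pvDBrace r (d - 1))
      else pvDBrace r d := by
  by_cases h1 : c = '{'
  · simp [pvDBrace, pvDScan, h1]
  · by_cases h2 : c = '}'
    · by_cases h3 : d = 1 <;> simp [pvDBrace, pvDScan, pvDWs, h1, h2, h3]
    · simp [pvDBrace, pvDScan, h1, h2]
theorem pvDQuote_cons (c : Char) (r : List Char) :
    pvDQuote (c :: r) = if c = '"' then pvDWs r else pvDQuote r := by
  by_cases h : c = '"' <;> simp [pvDQuote, pvDScan, pvDWs, h]
theorem pvDWord_cons (c : Char) (r : List Char) :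
    pvDWord (c :: r) = if c = ' ' ∨ c = '\t' then pvDWs r else pvDWord r := by
  by_cases h : c = ' ' ∨ c = '\t' <;> simp [pvDWord, pvDScan, pvDWs, h]

-- monotonicity facts about the scanners
theorem pvBraceScanA_ge (cs : List Char) (f : Nat) : ∀ i d, i ≤ pvBraceScanA cs f i d := by
  induction f with
  | zero => intro i d; exact Nat.le_refl i
  | succ f ih =>
      intro i d
      rw [pvBraceScanA_succ]
      split_ifs
      · exact Nat.le_trans (Nat.le_succ i) (ih (i + 1) (d + 1))
      · exact Nat.le_trans (Nat.le_succ i) (ih (i + 1) (d - 1))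
      · exact Nat.le_trans (Nat.le_succ i) (ih (i + 1) d)
      · exact Nat.le_refl i

theorem pvQuoteScanA_ge (cs : List Char) (f : Nat) : ∀ i, i ≤ pvQuoteScanA cs f i := by
  induction f with
  | zero => intro i; exact Nat.le_refl i
  | succ f ih =>
      intro i
      rw [pvQuoteScanA_succ]
      split_ifs
      · exact Nat.le_trans (Nat.le_succ i) (ih (i + 1))
      · exact Nat.le_refl i

theorem pvWordScanA_ge (cs : List Char) (f : Nat) : ∀ i, i ≤ pvWordScanA cs f i := by
  induction f with
  | zero => intro i; exact Nat.le_refl i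
  | succ f ih =>
      intro i
      rw [pvWordScanA_succ]
      split_ifs
      · exact Nat.le_trans (Nat.le_succ i) (ih (i + 1))
      · exact Nat.le_refl i

theorem pvWordScanA_gt (cs : List Char) (f i : Nat) (h1 : i < cs.length)
    (h2 : ¬(cs.getD i ' ' = ' ' ∨ cs.getD i ' ' = '\t')) :
    i + 1 ≤ pvWordScanA cs (f + 1) i := by
  rw [pvWordScanA_succ, if_pos ⟨h1, h2⟩]
  exact pvWordScanA_ge cs f (i + 1)

-- the skip loop's value does not depend on the fuel once the fuel is sufficient
theorem pvSkipWsA_irrel (cs : List Char) (f : Nat) : ∀ (f' i : Nat),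
    cs.length - i < f → cs.length - i < f' → pvSkipWsA cs f i = pvSkipWsA cs f' i := by
  induction f with
  | zero => intro f' i h _; exact absurd h (by omega)
  | succ f ih =>
      intro f' i h h'
      obtain ⟨g, rfl⟩ : ∃ g, f' = g + 1 := ⟨f' - 1, by omega⟩
      rw [pvSkipWsA_succ, pvSkipWsA_succ]
      by_cases hc : i < cs.length ∧ (cs.getD i ' ' = ' ' ∨ cs.getD i ' ' = '\t')
      · rw [if_pos hc, if_pos hc]
        exact ih g (i + 1) (by omega) (by omega)
      · rw [if_neg hc, if_neg hc]

-- B's machine run from index i to the end, then flushed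
def pvRunB (cs : List Char) (i : Nat) (st : PvModeB × Nat × Nat × List String) : List String :=
  pvFlushB cs ((List.range' i (cs.length - i)).foldl (pvStepB cs) st)

theorem pvRunB_end (cs : List Char) (i : Nat) (st : PvModeB × Nat × Nat × List String)
    (h : cs.length ≤ i) : pvRunB cs i st = pvFlushB cs st := by
  unfold pvRunB
  have hz : cs.length - i = 0 := by omega
  rw [hz]
  rfl

theorem pvRunB_cons (cs : List Char) (i : Nat) (st : PvModeB × Nat × Nat × List String)
    (h : i < cs.length) : pvRunB cs i st = pvRunB cs (i + 1) (pvStepB cs st i) := by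
  unfold pvRunB
  have hz : cs.length - i = (cs.length - (i + 1)) + 1 := by omega
  rw [hz, List.range'_succ, List.foldl_cons]

theorem pvDropCons (cs : List Char) (i : Nat) (h : i < cs.length) :
    cs.drop i = cs.getD i ' ' :: cs.drop (i + 1) := by
  rw [List.drop_eq_getElem_cons h, List.getD_eq_getElem cs ' ' h]

theorem pvDropNil (cs : List Char) (i : Nat) (h : cs.length ≤ i) : cs.drop i = [] :=
  List.drop_eq_nil_of_le h

theorem pvSliceEmpty (cs : List Char) (a b : Nat) (h : cs.length ≤ a) : pvSlice cs a b = "" := by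
  have h2 : (cs.take b).drop a = [] := List.drop_eq_nil_of_le (by rw [List.length_take]; omega)
  unfold pvSlice
  rw [h2]

theorem pvQuoteCorr (cs : List Char) (m : Nat) : ∀ (f j start b : Nat) (toks : List String),
    cs.length - j ≤ m → cs.length - j < f → j ≤ cs.length →
    pvRunB cs j (.quote, start, b, toks) =
      pvRunB cs (pvQuoteScanA cs f j + 1)
        (.ws, start, b, toks ++ [pvSlice cs start (pvQuoteScanA cs f j)]) := by
  induction m with
  | zero =>
      intro f j start b toks hm hf hj
      obtain ⟨g, rfl⟩ : ∃ g, f = g + 1 := ⟨f - 1, by omega⟩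
      have hq : pvQuoteScanA cs (g + 1) j = j := by
        rw [pvQuoteScanA_succ, if_neg (fun hh => absurd hh.1 (by omega))]
      rw [hq, pvRunB_end cs j _ (by omega), pvRunB_end cs (j + 1) _ (by omega)]
      simp only [pvFlushB]
      have hjl : j = cs.length := by omega
      rw [hjl]
      simp
  | succ m ih =>
      intro f j start b toks hm hf hj
      obtain ⟨g, rfl⟩ : ∃ g, f = g + 1 := ⟨f - 1, by omega⟩
      by_cases hlt : j < cs.length
      · by_cases hc : cs.getD j ' ' = '"'
        · have hq : pvQuoteScanA cs (g + 1) j = j := by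
            rw [pvQuoteScanA_succ, if_neg (fun hh => hh.2 hc)]
          rw [pvRunB_cons cs j _ hlt, hq]
          simp only [pvStepB]
          rw [if_pos hc]
        · have hq : pvQuoteScanA cs (g + 1) j = pvQuoteScanA cs g (j + 1) := by
            rw [pvQuoteScanA_succ, if_pos ⟨hlt, hc⟩]
          rw [pvRunB_cons cs j _ hlt, hq]
          simp only [pvStepB]
          rw [if_neg hc]
          exact ih g (j + 1) start b toks (by omega) (by omega) (by omega)
      · have hq : pvQuoteScanA cs (g + 1) j = j := by
          rw [pvQuoteScanA_succ, if_neg (fun hh => absurd hh.1 (by omega))]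
        rw [hq, pvRunB_end cs j _ (by omega), pvRunB_end cs (j + 1) _ (by omega)]
        simp only [pvFlushB]
        have hjl : j = cs.length := by omega
        rw [hjl]
        simp

theorem pvWordCorr (cs : List Char) (m : Nat) : ∀ (f j start b : Nat) (toks : List String),
    cs.length - j ≤ m → cs.length - j < f → j ≤ cs.length →
    pvRunB cs j (.word, start, b, toks) =
      pvRunB cs (pvWordScanA cs f j)
        (.ws, start, b, toks ++ [pvSlice cs start (pvWordScanA cs f j)]) := by
  induction m with
  | zero =>
      intro f j start b toks hm hf hj
      obtain ⟨g, rfl⟩ : ∃ g, f = g + 1 := ⟨f - 1, by omega⟩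
      have hq : pvWordScanA cs (g + 1) j = j := by
        rw [pvWordScanA_succ, if_neg (fun hh => absurd hh.1 (by omega))]
      rw [hq, pvRunB_end cs j _ (by omega), pvRunB_end cs j _ (by omega)]
      simp only [pvFlushB]
      have hjl : j = cs.length := by omega
      rw [hjl]
      simp
  | succ m ih =>
      intro f j start b toks hm hf hj
      obtain ⟨g, rfl⟩ : ∃ g, f = g + 1 := ⟨f - 1, by omega⟩
      by_cases hc : cs.getD j ' ' = ' ' ∨ cs.getD j ' ' = '\t'
      · by_cases hlt : j < cs.length
        · have hq : pvWordScanA cs (g + 1) j = j := by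
            rw [pvWordScanA_succ, if_neg (fun hh => hh.2 hc)]
          rw [hq, pvRunB_cons cs j (.word, start, b, toks) hlt,
            pvRunB_cons cs j (.ws, start, b, toks ++ [pvSlice cs start j]) hlt]
          simp only [pvStepB]
          rw [if_pos hc, if_pos hc]
        · have hq : pvWordScanA cs (g + 1) j = j := by
            rw [pvWordScanA_succ, if_neg (fun hh => absurd hh.1 (by omega))]
          rw [hq, pvRunB_end cs j _ (by omega), pvRunB_end cs j _ (by omega)]
          simp only [pvFlushB]
          have hjl : j = cs.length := by omega
          rw [hjl]
          simp
      · by_cases hlt : j < cs.length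
        · have hq : pvWordScanA cs (g + 1) j = pvWordScanA cs g (j + 1) := by
            rw [pvWordScanA_succ, if_pos ⟨hlt, hc⟩]
          rw [pvRunB_cons cs j _ hlt, hq]
          simp only [pvStepB]
          rw [if_neg hc]
          exact ih g (j + 1) start b toks (by omega) (by omega) (by omega)
        · have hq : pvWordScanA cs (g + 1) j = j := by
            rw [pvWordScanA_succ, if_neg (fun hh => absurd hh.1 (by omega))]
          rw [hq, pvRunB_end cs j _ (by omega), pvRunB_end cs j _ (by omega)]
          simp only [pvFlushB]
          have hjl : j = cs.length := by omega
          rw [hjl]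
          simp

-- the D-scanner agrees with A's scanners across a quoted / bare-word token
theorem pvQuoteProp (cs : List Char) (m : Nat) : ∀ (f j : Nat),
    cs.length - j ≤ m → cs.length - j < f → j ≤ cs.length →
    pvDWs (cs.drop (pvQuoteScanA cs f j + 1)) = pvDQuote (cs.drop j) := by
  induction m with
  | zero =>
      intro f j hm hf hj
      obtain ⟨g, rfl⟩ : ∃ g, f = g + 1 := ⟨f - 1, by omega⟩
      have hq : pvQuoteScanA cs (g + 1) j = j := by
        rw [pvQuoteScanA_succ, if_neg (fun hh => absurd hh.1 (by omega))]
      rw [hq, pvDropNil cs (j + 1) (by omega), pvDropNil cs j (by omega)]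
      rfl
  | succ m ih =>
      intro f j hm hf hj
      obtain ⟨g, rfl⟩ : ∃ g, f = g + 1 := ⟨f - 1, by omega⟩
      by_cases hlt : j < cs.length
      · rw [pvDropCons cs j hlt]
        by_cases hc : cs.getD j ' ' = '"'
        · have hq : pvQuoteScanA cs (g + 1) j = j := by
            rw [pvQuoteScanA_succ, if_neg (fun hh => hh.2 hc)]
          rw [hq, pvDQuote_cons, if_pos hc]
        · have hq : pvQuoteScanA cs (g + 1) j = pvQuoteScanA cs g (j + 1) := by
            rw [pvQuoteScanA_succ, if_pos ⟨hlt, hc⟩]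
          rw [hq, pvDQuote_cons, if_neg hc]
          exact ih g (j + 1) (by omega) (by omega) (by omega)
      · have hq : pvQuoteScanA cs (g + 1) j = j := by
          rw [pvQuoteScanA_succ, if_neg (fun hh => absurd hh.1 (by omega))]
        rw [hq, pvDropNil cs (j + 1) (by omega), pvDropNil cs j (by omega)]
        rfl

theorem pvWordProp (cs : List Char) (m : Nat) : ∀ (f j : Nat),
    cs.length - j ≤ m → cs.length - j < f → j ≤ cs.length →
    pvDWs (cs.drop (pvWordScanA cs f j)) = pvDWord (cs.drop j) := by
  induction m with
  | zero =>
      intro f j hm hf hj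
      obtain ⟨g, rfl⟩ : ∃ g, f = g + 1 := ⟨f - 1, by omega⟩
      have hq : pvWordScanA cs (g + 1) j = j := by
        rw [pvWordScanA_succ, if_neg (fun hh => absurd hh.1 (by omega))]
      rw [hq, pvDropNil cs j (by omega)]
      rfl
  | succ m ih =>
      intro f j hm hf hj
      obtain ⟨g, rfl⟩ : ∃ g, f = g + 1 := ⟨f - 1, by omega⟩
      by_cases hlt : j < cs.length
      · by_cases hc : cs.getD j ' ' = ' ' ∨ cs.getD j ' ' = '\t'
        · have hq : pvWordScanA cs (g + 1) j = j := by
            rw [pvWordScanA_succ, if_neg (fun hh => hh.2 hc)]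
          rw [hq]
          conv_lhs => rw [pvDropCons cs j hlt]
          conv_rhs => rw [pvDropCons cs j hlt]
          rw [pvDWs_cons, pvDWord_cons, if_pos hc, if_pos hc]
        · have hq : pvWordScanA cs (g + 1) j = pvWordScanA cs g (j + 1) := by
            rw [pvWordScanA_succ, if_pos ⟨hlt, hc⟩]
          rw [hq]
          conv_rhs => rw [pvDropCons cs j hlt]
          rw [pvDWord_cons, if_neg hc]
          exact ih g (j + 1) (by omega) (by omega) (by omega)
      · have hq : pvWordScanA cs (g + 1) j = j := by
          rw [pvWordScanA_succ, if_neg (fun hh => absurd hh.1 (by omega))]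
        rw [hq, pvDropNil cs j (by omega)]
        rfl

-- across a braced token: either the brace never closes (scan runs to the end; B flushes
-- the remainder) or it closes and both machines agree, with the D-scanner carried along
theorem pvBraceCorrGen (cs : List Char) (m : Nat) : ∀ (f j d start : Nat) (toks : List String),
    cs.length - j ≤ m → cs.length - j < f → j ≤ cs.length → 1 ≤ d →
    (pvDBrace (cs.drop j) d = true ∧ pvBraceScanA cs f j d = cs.length ∧
      pvRunB cs j (.brace, start, d, toks) = toks ++ [pvSlice cs start cs.length]) ∨
    (pvDWs (cs.drop (pvBraceScanA cs f j d)) = pvDBrace (cs.drop j) d ∧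
      pvRunB cs j (.brace, start, d, toks) =
        pvRunB cs (pvBraceScanA cs f j d)
          (.ws, start, 0, toks ++ [pvSlice cs start (pvBraceScanA cs f j d - 1)])) := by
  induction m with
  | zero =>
      intro f j d start toks hm hf hj hd
      obtain ⟨g, rfl⟩ : ∃ g, f = g + 1 := ⟨f - 1, by omega⟩
      left
      have hjl : j = cs.length := by omega
      have hb : pvBraceScanA cs (g + 1) j d = j := by
        rw [pvBraceScanA_succ, if_neg (fun hh => absurd hh.1 (by omega))]
      refine ⟨?_, by omega, ?_⟩
      · rw [pvDropNil cs j (by omega)]; rfl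
      · rw [pvRunB_end cs j _ (by omega)]
        simp [pvFlushB]
  | succ m ih =>
      intro f j d start toks hm hf hj hd
      obtain ⟨g, rfl⟩ : ∃ g, f = g + 1 := ⟨f - 1, by omega⟩
      by_cases hlt : j < cs.length
      · by_cases ho : cs.getD j ' ' = '{'
        · have hb : pvBraceScanA cs (g + 1) j d = pvBraceScanA cs g (j + 1) (d + 1) := by
            rw [pvBraceScanA_succ, if_pos ⟨hlt, by omega⟩, if_pos ho]
          have hD : pvDBrace (cs.drop j) d = pvDBrace (cs.drop (j + 1)) (d + 1) := by
            rw [pvDropCons cs j hlt, pvDBrace_cons, if_pos ho]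
          rw [pvRunB_cons cs j _ hlt]
          simp only [pvStepB]
          rw [if_pos ho, hb, hD]
          exact ih g (j + 1) (d + 1) start toks (by omega) (by omega) (by omega) (by omega)
        · by_cases hcl : cs.getD j ' ' = '}'
          · by_cases hd1 : d = 1
            · subst hd1
              right
              have hb : pvBraceScanA cs (g + 1) j 1 = j + 1 := by
                rw [pvBraceScanA_succ, if_pos ⟨hlt, by omega⟩, if_neg ho, if_pos hcl]
                cases g with
                | zero => rfl
                | succ g' => rw [pvBraceScanA_succ, if_neg (by omega)]
              have hD : pvDBrace (cs.drop j) 1 = pvDWs (cs.drop (j + 1)) := by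
                rw [pvDropCons cs j hlt, pvDBrace_cons, if_neg ho, if_pos hcl]
                simp
              refine ⟨by rw [hb, hD], ?_⟩
              rw [pvRunB_cons cs j _ hlt, hb]
              simp only [pvStepB]
              rw [if_neg ho, if_pos hcl]
              simp
            · have hb : pvBraceScanA cs (g + 1) j d = pvBraceScanA cs g (j + 1) (d - 1) := by
                rw [pvBraceScanA_succ, if_pos ⟨hlt, by omega⟩, if_neg ho, if_pos hcl]
              have hD : pvDBrace (cs.drop j) d = pvDBrace (cs.drop (j + 1)) (d - 1) := by
                rw [pvDropCons cs j hlt, pvDBrace_cons, if_neg ho, if_pos hcl, if_neg hd1]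
              rw [pvRunB_cons cs j _ hlt]
              simp only [pvStepB]
              rw [if_neg ho, if_pos hcl, if_neg (by omega), hb, hD]
              exact ih g (j + 1) (d - 1) start toks (by omega) (by omega) (by omega) (by omega)
          · have hb : pvBraceScanA cs (g + 1) j d = pvBraceScanA cs g (j + 1) d := by
              rw [pvBraceScanA_succ, if_pos ⟨hlt, by omega⟩, if_neg ho, if_neg hcl]
            have hD : pvDBrace (cs.drop j) d = pvDBrace (cs.drop (j + 1)) d := by
              rw [pvDropCons cs j hlt, pvDBrace_cons, if_neg ho, if_neg hcl]
            rw [pvRunB_cons cs j _ hlt]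
            simp only [pvStepB]
            rw [if_neg ho, if_neg hcl, hb, hD]
            exact ih g (j + 1) d start toks (by omega) (by omega) (by omega) (by omega)
      · left
        have hjl : j = cs.length := by omega
        have hb : pvBraceScanA cs (g + 1) j d = j := by
          rw [pvBraceScanA_succ, if_neg (fun hh => absurd hh.1 (by omega))]
        refine ⟨?_, by omega, ?_⟩
        · rw [pvDropNil cs j (by omega)]; rfl
        · rw [pvRunB_end cs j _ (by omega)]
          simp [pvFlushB]

theorem pvMainWsStep (cs : List Char) (F i : Nat) (toks : List String) (h : i < cs.length)
    (hc : cs.getD i ' ' = ' ' ∨ cs.getD i ' ' = '\t') :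
    pvMainA cs (F + 1) i toks = pvMainA cs (F + 1) (i + 1) toks := by
  have hs : pvSkipWsA cs (cs.length + 1) i = pvSkipWsA cs (cs.length + 1) (i + 1) := by
    rw [pvSkipWsA_succ, if_pos ⟨h, hc⟩]
    exact pvSkipWsA_irrel cs cs.length (cs.length + 1) (i + 1) (by omega) (by omega)
  by_cases h2 : i + 1 < cs.length
  · rw [pvMainA_succ, pvMainA_succ, if_pos h, if_pos h2, hs]
  · have hs2 : pvSkipWsA cs (cs.length + 1) (i + 1) = i + 1 := by
      rw [pvSkipWsA_succ, if_neg (fun hh => absurd hh.1 (by omega))]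
    rw [pvMainA_succ, pvMainA_succ, if_pos h, if_neg h2, hs, hs2, if_neg (by omega)]

-- main correspondence: from a whitespace state, when the D-scanner says no unterminated
-- brace lies ahead, A's loop and B's machine produce the same tokens
theorem pvMainCorr (cs : List Char) (m : Nat) : ∀ (F i a b : Nat) (toks : List String),
    cs.length - i ≤ m → cs.length - i < F → pvDWs (cs.drop i) = false →
    pvRunB cs i (.ws, a, b, toks) = pvMainA cs F i toks := by
  induction m with
  | zero =>
      intro F i a b toks hm hF hD
      rw [pvRunB_end cs i _ (by omega), pvMainA_end cs F i toks (by omega)]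
      rfl
  | succ m ih =>
      intro F i a b toks hm hF hD
      obtain ⟨G, rfl⟩ : ∃ G, F = G + 1 := ⟨F - 1, by omega⟩
      by_cases hl : i < cs.length
      · rw [pvDropCons cs i hl] at hD
        by_cases hws : cs.getD i ' ' = ' ' ∨ cs.getD i ' ' = '\t'
        · rw [pvRunB_cons cs i _ hl]
          simp only [pvStepB]
          rw [if_pos hws, pvMainWsStep cs G i toks hl hws]
          refine ih (G + 1) (i + 1) a b toks (by omega) (by omega) ?_
          rw [pvDWs_cons] at hD
          rwa [if_pos hws] at hD
        · have hski : pvSkipWsA cs (cs.length + 1) i = i := by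
            rw [pvSkipWsA_succ, if_neg (fun hh => hws hh.2)]
          rw [pvMainA_succ, if_pos hl, hski, if_pos hl]
          by_cases hbr : cs.getD i ' ' = '{'
          · rw [if_pos hbr, pvRunB_cons cs i _ hl]
            simp only [pvStepB]
            rw [if_neg hws, if_pos hbr]
            rw [pvDWs_cons, if_neg hws, if_pos hbr] at hD
            by_cases hnil : cs.drop (i + 1) = []
            · -- the '{' is the last character: A appends s[n:n-1] = "", B flushes s[n:n] = ""
              have hin : i + 1 = cs.length := by
                have := List.drop_eq_nil_iff.mp hnil
                omega
              have hb : pvBraceScanA cs (cs.length + 1) (i + 1) 1 = i + 1 := by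
                rw [pvBraceScanA_succ, if_neg (fun hh => absurd hh.1 (by omega))]
              rw [hb, pvRunB_end cs (i + 1) _ (by omega), pvMainA_end cs G (i + 1) _ (by omega)]
              simp only [pvFlushB]
              rw [pvSliceEmpty cs (i + 1) (i + 1 - 1) (by omega),
                pvSliceEmpty cs (i + 1) cs.length (by omega)]
              simp
            · rw [if_neg hnil] at hD
              rcases pvBraceCorrGen cs m (cs.length + 1) (i + 1) 1 (i + 1) toks (by omega)
                  (by omega) (by omega) (by omega) with ⟨hT, _, _⟩ | ⟨hP, hE⟩
              · rw [hT] at hD; exact absurd hD (by simp)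
              · rw [hE]
                have hge := pvBraceScanA_ge cs (cs.length + 1) (i + 1) 1
                refine ih G _ _ _ _ (by omega) (by omega) ?_
                rw [hP, hD]
          · by_cases hq : cs.getD i ' ' = '"'
            · rw [if_neg hbr, if_pos hq, pvRunB_cons cs i _ hl]
              simp only [pvStepB]
              rw [if_neg hws, if_neg hbr, if_pos hq]
              rw [pvDWs_cons, if_neg hws, if_neg hbr, if_pos hq] at hD
              have hge := pvQuoteScanA_ge cs (cs.length + 1) (i + 1)
              rw [pvQuoteCorr cs m (cs.length + 1) (i + 1) (i + 1) b toks (by omega) (by omega)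
                (by omega)]
              refine ih G _ _ _ _ (by omega) (by omega) ?_
              rw [pvQuoteProp cs (cs.length - (i + 1)) (cs.length + 1) (i + 1) (by omega)
                (by omega) (by omega), hD]
            · rw [if_neg hbr, if_neg hq, pvRunB_cons cs i _ hl]
              simp only [pvStepB]
              rw [if_neg hws, if_neg hbr, if_neg hq]
              rw [pvDWs_cons, if_neg hws, if_neg hbr, if_neg hq] at hD
              have hw : pvWordScanA cs (cs.length + 1) i = pvWordScanA cs cs.length (i + 1) := by
                rw [pvWordScanA_succ, if_pos ⟨hl, hws⟩]
              have hgt := pvWordScanA_gt cs cs.length i hl hws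
              rw [pvWordCorr cs m cs.length (i + 1) i b toks (by omega) (by omega)
                (by omega), ← hw]
              refine ih G _ _ _ _ (by omega) (by omega) ?_
              rw [pvWordProp cs (cs.length - i) (cs.length + 1) i (by omega) (by omega)
                (by omega), pvDropCons cs i hl, pvDWord_cons]
              rwa [if_neg hws]
      · rw [pvRunB_end cs i _ (by omega), pvMainA_end cs (G + 1) i toks (by omega)]
        rfl

-- divergence: from a whitespace state, when the D-scanner DOES report an unterminated
-- brace ahead, A ends with s[start:n-1] and B with s[start:n] over a common prefix
theorem pvMainDiff (cs : List Char) (m : Nat) : ∀ (F i a b : Nat) (toks : List String),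
    cs.length - i ≤ m → cs.length - i < F → pvDWs (cs.drop i) = true →
    ∃ (T : List String) (st : Nat), st < cs.length ∧
      pvMainA cs F i toks = T ++ [pvSlice cs st (cs.length - 1)] ∧
      pvRunB cs i (.ws, a, b, toks) = T ++ [pvSlice cs st cs.length] := by
  induction m with
  | zero =>
      intro F i a b toks hm hF hD
      rw [pvDropNil cs i (by omega)] at hD
      exact absurd hD (by simp [pvDWs_nil])
  | succ m ih =>
      intro F i a b toks hm hF hD
      obtain ⟨G, rfl⟩ : ∃ G, F = G + 1 := ⟨F - 1, by omega⟩
      by_cases hl : i < cs.length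
      · rw [pvDropCons cs i hl] at hD
        by_cases hws : cs.getD i ' ' = ' ' ∨ cs.getD i ' ' = '\t'
        · rw [pvRunB_cons cs i _ hl]
          simp only [pvStepB]
          rw [if_pos hws, pvMainWsStep cs G i toks hl hws]
          refine ih (G + 1) (i + 1) a b toks (by omega) (by omega) ?_
          rw [pvDWs_cons] at hD
          rwa [if_pos hws] at hD
        · have hski : pvSkipWsA cs (cs.length + 1) i = i := by
            rw [pvSkipWsA_succ, if_neg (fun hh => hws hh.2)]
          rw [pvMainA_succ, if_pos hl, hski, if_pos hl]
          by_cases hbr : cs.getD i ' ' = '{'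
          · rw [if_pos hbr, pvRunB_cons cs i _ hl]
            simp only [pvStepB]
            rw [if_neg hws, if_pos hbr]
            rw [pvDWs_cons, if_neg hws, if_pos hbr] at hD
            by_cases hnil : cs.drop (i + 1) = []
            · rw [if_pos hnil] at hD
              exact absurd hD (by simp)
            · rw [if_neg hnil] at hD
              have hin : i + 1 < cs.length := by
                by_contra hcon
                exact hnil (pvDropNil cs (i + 1) (by omega))
              rcases pvBraceCorrGen cs m (cs.length + 1) (i + 1) 1 (i + 1) toks (by omega)
                  (by omega) (by omega) (by omega) with ⟨_, hS, hR⟩ | ⟨hP, hE⟩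
              · refine ⟨toks, i + 1, hin, ?_, hR⟩
                rw [hS, pvMainA_end cs G cs.length _ (by omega)]
              · rw [hE]
                have hge := pvBraceScanA_ge cs (cs.length + 1) (i + 1) 1
                refine ih G _ _ _ _ (by omega) (by omega) ?_
                rw [hP, hD]
          · by_cases hq : cs.getD i ' ' = '"'
            · rw [if_neg hbr, if_pos hq, pvRunB_cons cs i _ hl]
              simp only [pvStepB]
              rw [if_neg hws, if_neg hbr, if_pos hq]
              rw [pvDWs_cons, if_neg hws, if_neg hbr, if_pos hq] at hD
              have hge := pvQuoteScanA_ge cs (cs.length + 1) (i + 1)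
              rw [pvQuoteCorr cs m (cs.length + 1) (i + 1) (i + 1) b toks (by omega) (by omega)
                (by omega)]
              refine ih G _ _ _ _ (by omega) (by omega) ?_
              rw [pvQuoteProp cs (cs.length - (i + 1)) (cs.length + 1) (i + 1) (by omega)
                (by omega) (by omega), hD]
            · rw [if_neg hbr, if_neg hq, pvRunB_cons cs i _ hl]
              simp only [pvStepB]
              rw [if_neg hws, if_neg hbr, if_neg hq]
              rw [pvDWs_cons, if_neg hws, if_neg hbr, if_neg hq] at hD
              have hw : pvWordScanA cs (cs.length + 1) i = pvWordScanA cs cs.length (i + 1) := by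
                rw [pvWordScanA_succ, if_pos ⟨hl, hws⟩]
              have hgt := pvWordScanA_gt cs cs.length i hl hws
              rw [pvWordCorr cs m cs.length (i + 1) i b toks (by omega) (by omega)
                (by omega), ← hw]
              refine ih G _ _ _ _ (by omega) (by omega) ?_
              rw [pvWordProp cs (cs.length - i) (cs.length + 1) i (by omega) (by omega)
                (by omega), pvDropCons cs i hl, pvDWord_cons]
              rwa [if_neg hws]
      · rw [pvDropNil cs i (by omega)] at hD
        exact absurd hD (by simp [pvDWs_nil])

theorem pvAltRun (s : String) :
    tokenize_tcl_py_alt s = pvRunB s.toList 0 (.ws, 0, 0, []) := by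
  unfold tokenize_tcl_py_alt pvRunB
  rw [List.range_eq_range']
  simp

-- ===== VERDICT (by name: the statements are the Claim_ definitions above) =====
theorem tokenize_tcl_py_spec : Claim_unchanged_tokenize_tcl_py := by
  intro s _ hD
  unfold D_tokenize_tcl_py at hD
  unfold tokenize_tcl_py
  rw [pvAltRun]
  exact (pvMainCorr s.toList s.toList.length (s.toList.length + 1) 0 0 0 [] (by omega)
    (by omega)
    (by simpa using Bool.not_eq_true _ ▸ (by simpa using hD : pvDWs s.toList ≠ true))).symm

theorem tokenize_tcl_py_changed : Claim_changed_tokenize_tcl_py := by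
  unfold Claim_changed_tokenize_tcl_py
  decide

theorem tokenize_tcl_py_tight : Claim_exact_tokenize_tcl_py := by
  intro s _ hD
  unfold D_tokenize_tcl_py at hD
  unfold tokenize_tcl_py
  rw [pvAltRun]
  obtain ⟨T, st, hst, hA, hB⟩ :=
    pvMainDiff s.toList s.toList.length (s.toList.length + 1) 0 0 0 [] (by omega) (by omega)
      (by simpa using hD)
  rw [hA, hB]
  intro hEq
  have hS := List.append_cancel_left hEq
  have hS2 : pvSlice s.toList st (s.toList.length - 1) = pvSlice s.toList st s.toList.length := by
    simpa using hS
  have hLen := congrArg (fun t => t.toList.length) hS2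
  simp only [pvSlice, String.toList_ofList, List.length_drop, List.length_take] at hLen
  omega
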